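-- pv_equiv track=rewrite | github.com/laboratorybox/hither2 | hither2/file.py | _get_basename_from_path
-- ===== SOURCE A (Python) =====
-- def _get_basename_from_path(path):
--     if path.startswith('sha1://'):
--         return _get_basename_from_path(path[7:])
--     elif path.startswith('sha1dir://'):
--         return _get_basename_from_path(path[10:])
--     a = path.split('/')
--     if len(a) > 1:
--         return a[-1]
--     return None
-- ===== SOURCE B (Python) =====
-- def _get_basename_from_path(path):
--     # advance an index over any number of sha1://, sha1dir:// prefixes (no slicing)
--     i = 0
--     while True:
--         if path.startswith('sha1://', i):
--             i += 7
--         elif path.startswith('sha1dir://', i):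
--             i += 10
--         else:
--             break
--     stripped = path[i:]
--     j = stripped.rfind('/')
--     if j < 0:
--         return None
--     return stripped[j + 1:]
-- ===== Notes on version B (the rewrite author's own statement) =====
-- stated objective: alternative
-- what changed: A's self-recursion that slices prefixes off and then splits the remainder into a list of slash-separated pieces is replaced by an index-advancing loop over the unchanged string plus an rfind for the last slash, returning the substring after it (None when there is no slash).
import Mathlib
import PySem

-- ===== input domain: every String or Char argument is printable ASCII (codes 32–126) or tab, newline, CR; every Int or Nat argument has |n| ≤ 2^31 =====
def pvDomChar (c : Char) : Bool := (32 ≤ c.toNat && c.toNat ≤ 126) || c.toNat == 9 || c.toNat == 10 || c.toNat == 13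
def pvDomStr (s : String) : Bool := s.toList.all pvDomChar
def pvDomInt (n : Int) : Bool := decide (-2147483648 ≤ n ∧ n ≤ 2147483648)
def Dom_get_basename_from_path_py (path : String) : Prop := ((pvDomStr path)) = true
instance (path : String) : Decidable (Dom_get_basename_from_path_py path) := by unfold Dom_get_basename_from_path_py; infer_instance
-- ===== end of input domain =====

-- B replaces A's slice-and-recurse prefix stripping by an index-advancing loop over the unchanged
-- string and A's split('/')-into-a-list by an rfind for the last '/' (alternative decomposition,
-- same asymptotic cost, same return value on every input).

-- ===== PORT A =====
-- A recurses after slicing off a 'sha1://' or 'sha1dir://' prefix; else splits on '/',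
-- returning the last piece when there is more than one, else None.
def pvAux_aCore (s : List Char) : Option (List Char) :=
  if PySem.Chars.startswith s "sha1://".toList then
    pvAux_aCore (PySem.Chars.slice s (some 7) none)
  else if PySem.Chars.startswith s "sha1dir://".toList then
    pvAux_aCore (PySem.Chars.slice s (some 10) none)
  else
    let a := PySem.Chars.splitOn s ['/']
    if 1 < a.length then PySem.List.pyGet? a (-1) else none
termination_by s.length
decreasing_by
  · have h7 : "sha1://".toList <+: s := (PySem.Chars.startswith_iff _ _).mp (by assumption)
    have hlen : 7 ≤ s.length := by simpa using h7.length_le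
    have he : PySem.Chars.slice s (some 7) none = s.drop 7 := by
      rw [PySem.Chars.slice_eq_listSlice]
      simpa using PySem.List.slice_from (xs := s) (a := (7:Int)) (by norm_num)
    simp only [he, List.length_drop]
    omega
  · have h10 : "sha1dir://".toList <+: s := (PySem.Chars.startswith_iff _ _).mp (by assumption)
    have hlen : 10 ≤ s.length := by simpa using h10.length_le
    have he : PySem.Chars.slice s (some 10) none = s.drop 10 := by
      rw [PySem.Chars.slice_eq_listSlice]
      simpa using PySem.List.slice_from (xs := s) (a := (10:Int)) (by norm_num)
    simp only [he, List.length_drop]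
    omega

def get_basename_from_path_py (path : String) : Option String :=
  (pvAux_aCore path.toList).map String.ofList

-- ===== PORT B =====
-- the 'while True' loop advancing the index i; path.startswith(p, i) is 'p is a prefix of s.drop i'
def pvAux_bStripIdx (s : List Char) (i : Nat) : Nat :=
  if List.isPrefixOf "sha1://".toList (s.drop i) then pvAux_bStripIdx s (i + 7)
  else if List.isPrefixOf "sha1dir://".toList (s.drop i) then pvAux_bStripIdx s (i + 10)
  else i
termination_by s.length - i
decreasing_by
  · have h := (List.isPrefixOf_iff_prefix.mp (by assumption)).length_le
    have e : ("sha1://".toList).length = 7 := rfl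
    rw [e, List.length_drop] at h
    omega
  · have h := (List.isPrefixOf_iff_prefix.mp (by assumption)).length_le
    have e : ("sha1dir://".toList).length = 10 := rfl
    rw [e, List.length_drop] at h
    omega

-- stripped.rfind('/'): index of the last '/', or none
def pvAux_bRfind : List Char → Option Nat
  | [] => none
  | c :: rest =>
    match pvAux_bRfind rest with
    | some k => some (k + 1)
    | none => if c = '/' then some 0 else none

def get_basename_from_path_py_alt (path : String) : Option String :=
  let stripped := path.toList.drop (pvAux_bStripIdx path.toList 0)
  match pvAux_bRfind stripped with
  | none => none
  | some j => some (String.ofList (stripped.drop (j + 1)))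

-- ===== PRECONDITION & SPEC =====
def Spec_get_basename_from_path_py (path : String) (out : Option String) : Prop := out = get_basename_from_path_py_alt path
instance (path : String) (out : Option String) : Decidable (Spec_get_basename_from_path_py path out) := by unfold Spec_get_basename_from_path_py; infer_instance

-- ===== CLAIM (what is proved, stated in full; the proofs are below) =====
def Claim_equal_get_basename_from_path_py : Prop := ∀ (path : String), Dom_get_basename_from_path_py path → Spec_get_basename_from_path_py path (get_basename_from_path_py path)

-- ===== LEMMAS AND PROOFS =====

-- structural model of path.split('/')
def pvSplitM : List Char → List (List Char)
  | [] => [[]]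
  | c :: rest =>
    if c = '/' then [] :: pvSplitM rest
    else
      match pvSplitM rest with
      | [] => [[c]]
      | h :: t => (c :: h) :: t

theorem pvSplitM_ne_nil (s : List Char) : pvSplitM s ≠ [] := by
  cases s with
  | nil => simp [pvSplitM]
  | cons c rest =>
    simp only [pvSplitM]
    split
    · simp
    · split <;> simp

theorem pvSplitOn_go_eq (fuel : Nat) (l cur : List Char) (acc : List (List Char))
    (h : List Char) (ht : List (List Char)) (hfuel : l.length ≤ fuel)
    (hm : pvSplitM l = h :: ht) :
    PySem.Chars.splitOn.go ['/'] fuel l cur acc = acc.reverse ++ (cur.reverse ++ h) :: ht := by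
  induction fuel generalizing l cur acc h ht with
  | zero =>
    have hl : l = [] := by
      cases l with
      | nil => rfl
      | cons c r => simp at hfuel
    subst hl
    simp [pvSplitM] at hm
    rw [PySem.Chars.splitOn.go.eq_def]
    simp [hm.1, hm.2]
  | succ fuel ih =>
    cases l with
    | nil =>
      simp [pvSplitM] at hm
      rw [PySem.Chars.splitOn.go.eq_def]
      simp [hm.1, hm.2]
    | cons c rest =>
      rw [PySem.Chars.splitOn.go.eq_def]
      by_cases hc : c = '/'
      · have hpre : List.isPrefixOf ['/'] (c :: rest) = true := by simp [List.isPrefixOf, hc]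
        simp only [hpre, if_pos]
        obtain ⟨h', ht', hm'⟩ : ∃ h' ht', pvSplitM rest = h' :: ht' := by
          cases hrec : pvSplitM rest with
          | nil => exact absurd hrec (pvSplitM_ne_nil rest)
          | cons a b => exact ⟨a, b, rfl⟩
        have : pvSplitM (c :: rest) = [] :: h' :: ht' := by simp [pvSplitM, hc, hm']
        rw [this] at hm
        injection hm with h1 h2
        subst h1; subst h2
        have := ih rest [] (cur.reverse :: acc) h' ht' (by simp at hfuel ⊢; omega) hm'
        simpa using this
      · have hpre : List.isPrefixOf ['/'] (c :: rest) = false := by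
          simp [List.isPrefixOf]
          exact fun hh => absurd hh.symm hc
        simp only [hpre, Bool.false_eq_true, if_false]
        obtain ⟨h', ht', hm'⟩ : ∃ h' ht', pvSplitM rest = h' :: ht' := by
          cases hrec : pvSplitM rest with
          | nil => exact absurd hrec (pvSplitM_ne_nil rest)
          | cons a b => exact ⟨a, b, rfl⟩
        have : pvSplitM (c :: rest) = (c :: h') :: ht' := by simp [pvSplitM, hc, hm']
        rw [this] at hm
        injection hm with h1 h2
        subst h1; subst h2
        have := ih rest (c :: cur) acc h' ht' (by simp at hfuel ⊢; omega) hm'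
        rw [this]
        simp

theorem pvSplitOn_eq (s : List Char) : PySem.Chars.splitOn s ['/'] = pvSplitM s := by
  obtain ⟨h, ht, hm⟩ : ∃ h ht, pvSplitM s = h :: ht := by
    cases hrec : pvSplitM s with
    | nil => exact absurd hrec (pvSplitM_ne_nil s)
    | cons a b => exact ⟨a, b, rfl⟩
  show PySem.Chars.splitOn.go ['/'] (s.length + 1) s [] [] = _
  rw [pvSplitOn_go_eq (s.length + 1) s [] [] h ht (by omega) hm, hm]
  simp

-- everything after the last '/'
def pvAfterLast (s : List Char) : List Char := (s.reverse.takeWhile (· ≠ '/')).reverse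

theorem pvGetLast?_cons {α : Type} (a : α) (t : List α) (ht : t ≠ []) :
    (a :: t).getLast? = t.getLast? := by
  cases t with
  | nil => simp at ht
  | cons b t' => simp [List.getLast?_cons_cons]

theorem pvTakeWhile_ne_self (l : List Char) (hl : '/' ∈ l) :
    (l.takeWhile (· ≠ '/')).length ≠ l.length := by
  intro hlen
  have heq := (List.takeWhile_prefix (l := l) (· ≠ '/')).eq_of_length hlen
  have := List.mem_takeWhile_imp (l := l) (p := (· ≠ '/')) (x := '/') (by rw [heq]; exact hl)
  simp at this

theorem pvSplitM_no_slash (s : List Char) (hs : '/' ∉ s) : pvSplitM s = [s] := by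
  induction s with
  | nil => simp [pvSplitM]
  | cons c rest ih =>
    have hc : ¬ c = '/' := by intro h; exact hs (by simp [h])
    have hr : '/' ∉ rest := fun h => hs (by simp [h])
    simp [pvSplitM, hc, ih hr]

theorem pvAfterLast_cons_of_mem (c : Char) (rest : List Char) (hr : '/' ∈ rest) :
    pvAfterLast (c :: rest) = pvAfterLast rest := by
  unfold pvAfterLast
  rw [List.reverse_cons, List.takeWhile_append,
    if_neg (pvTakeWhile_ne_self rest.reverse (by simpa using hr))]

theorem pvAfterLast_slash_head (rest : List Char) (hr : '/' ∉ rest) :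
    pvAfterLast ('/' :: rest) = rest := by
  unfold pvAfterLast
  rw [List.reverse_cons, List.takeWhile_append, if_pos]
  · rw [List.takeWhile_cons_of_neg (by simp)]
    simp
  · congr 1
    rw [List.takeWhile_eq_self_iff]
    intro x hx
    simp only [decide_eq_true_eq]
    intro hxe
    exact hr (by subst hxe; simpa using hx)

theorem pvSplitM_slash (s : List Char) (hs : '/' ∈ s) :
    1 < (pvSplitM s).length ∧ (pvSplitM s).getLast? = some (pvAfterLast s) := by
  induction s with
  | nil => simp at hs
  | cons c rest ih =>
    by_cases hc : c = '/'
    · subst hc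
      by_cases hr : '/' ∈ rest
      · obtain ⟨hlen, hlast⟩ := ih hr
        refine ⟨by simp [pvSplitM]; omega, ?_⟩
        rw [pvAfterLast_cons_of_mem '/' rest hr]
        rw [show pvSplitM ('/'::rest) = [] :: pvSplitM rest from by simp [pvSplitM]]
        rw [pvGetLast?_cons _ _ (pvSplitM_ne_nil rest)]
        exact hlast
      · have h1 := pvSplitM_no_slash rest hr
        refine ⟨by simp [pvSplitM, h1], ?_⟩
        simp [pvSplitM, h1, pvAfterLast_slash_head rest hr]
    · have hr : '/' ∈ rest := by cases hs with | head => exact absurd rfl hc | tail _ h => exact h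
      obtain ⟨hlen, hlast⟩ := ih hr
      obtain ⟨h', t', hm'⟩ : ∃ h' t', pvSplitM rest = h' :: t' := by
        cases hrec : pvSplitM rest with
        | nil => exact absurd hrec (pvSplitM_ne_nil rest)
        | cons a b => exact ⟨a, b, rfl⟩
      have ht' : t' ≠ [] := by
        rw [hm'] at hlen; simp at hlen
        intro h; subst h; simp at hlen
      refine ⟨?_, ?_⟩
      · simp only [pvSplitM, if_neg hc, hm']
        rw [hm'] at hlen; simpa using hlen
      · rw [pvAfterLast_cons_of_mem c rest hr]
        simp only [pvSplitM, if_neg hc, hm']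
        rw [pvGetLast?_cons _ _ ht']
        rw [hm', pvGetLast?_cons _ _ ht'] at hlast
        exact hlast

theorem pvPyGet_neg_one (a : List (List Char)) (ha : a ≠ []) :
    PySem.List.pyGet? a (-1) = a.getLast? := by
  cases a with
  | nil => simp at ha
  | cons h t => simp [PySem.List.pyGet?, PySem.List.pyIdx?, List.getLast?_eq_getElem?]

-- rfind: none exactly when there is no '/'
theorem pvRfind_none (t : List Char) : pvAux_bRfind t = none ↔ '/' ∉ t := by
  induction t with
  | nil => simp [pvAux_bRfind]
  | cons c rest ih =>
    simp only [pvAux_bRfind]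
    cases hr : pvAux_bRfind rest with
    | some k =>
      simp only []
      constructor
      · intro h; simp at h
      · intro h
        exact absurd (ih.mpr (fun hm => h (List.mem_cons_of_mem _ hm))) (by simp [hr])
    | none =>
      by_cases hc : c = '/'
      · simp [hc]
      · simp [hc, ih.mp hr, Ne.symm hc]

-- rfind hit: the tail after that index is everything after the last '/'
theorem pvRfind_some (t : List Char) (j : Nat) (h : pvAux_bRfind t = some j) :
    t.drop (j + 1) = pvAfterLast t := by
  induction t generalizing j with
  | nil => simp [pvAux_bRfind] at h
  | cons c rest ih =>
    simp only [pvAux_bRfind] at h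
    cases hr : pvAux_bRfind rest with
    | some k =>
      rw [hr] at h
      injection h with h
      subst h
      have hm : '/' ∈ rest := by
        by_contra hm
        simp [(pvRfind_none rest).mpr hm] at hr
      rw [pvAfterLast_cons_of_mem c rest hm]
      simpa using ih k hr
    | none =>
      rw [hr] at h
      by_cases hc : c = '/'
      · rw [if_pos hc] at h
        injection h with h
        subst h hc
        rw [pvAfterLast_slash_head rest ((pvRfind_none rest).mp hr)]
        simp
      · simp [hc] at h

-- A's post-strip computation equals B's rfind-based one
theorem pvTail_eq (t : List Char) :
    (if 1 < (PySem.Chars.splitOn t ['/']).length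
      then PySem.List.pyGet? (PySem.Chars.splitOn t ['/']) (-1) else none) =
    (match pvAux_bRfind t with
      | none => none
      | some j => some (t.drop (j + 1))) := by
  rw [pvSplitOn_eq]
  cases hr : pvAux_bRfind t with
  | none =>
    rw [pvSplitM_no_slash t ((pvRfind_none t).mp hr)]
    simp
  | some j =>
    have hm : '/' ∈ t := by
      by_contra hm
      simp [(pvRfind_none t).mpr hm] at hr
    obtain ⟨hlen, hlast⟩ := pvSplitM_slash t hm
    rw [if_pos hlen, pvPyGet_neg_one _ (pvSplitM_ne_nil t), hlast]
    simp [pvRfind_some t j hr]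

-- Python's startswith agrees with the prefix test B's port uses
theorem pvStarts_eq (s p : List Char) :
    PySem.Chars.startswith s p = List.isPrefixOf p s := by
  rw [Bool.eq_iff_iff, PySem.Chars.startswith_iff, List.isPrefixOf_iff_prefix]

-- the core agreement: A on the suffix at i = B's tail on the suffix at the final index
theorem pvCore_eq (s : List Char) (i : Nat) :
    pvAux_aCore (s.drop i) =
    (match pvAux_bRfind (s.drop (pvAux_bStripIdx s i)) with
      | none => none
      | some j => some ((s.drop (pvAux_bStripIdx s i)).drop (j + 1))) := by
  fun_induction pvAux_bStripIdx s i with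
  | case1 i h7 ih =>
    rw [pvAux_aCore, if_pos (by rw [pvStarts_eq]; exact h7)]
    have he : PySem.Chars.slice (s.drop i) (some 7) none = s.drop (i + 7) := by
      rw [PySem.Chars.slice_eq_listSlice]
      have := PySem.List.slice_from (xs := s.drop i) (a := (7:Int)) (by norm_num)
      simpa [List.drop_drop, Nat.add_comm] using this
    rw [he]
    exact ih
  | case2 i h7 h10 ih =>
    rw [pvAux_aCore, if_neg (by rw [pvStarts_eq]; exact h7),
      if_pos (by rw [pvStarts_eq]; exact h10)]
    have he : PySem.Chars.slice (s.drop i) (some 10) none = s.drop (i + 10) := by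
      rw [PySem.Chars.slice_eq_listSlice]
      have := PySem.List.slice_from (xs := s.drop i) (a := (10:Int)) (by norm_num)
      simpa [List.drop_drop, Nat.add_comm] using this
    rw [he]
    exact ih
  | case3 i h7 h10 =>
    rw [pvAux_aCore, if_neg (by rw [pvStarts_eq]; exact h7),
      if_neg (by rw [pvStarts_eq]; exact h10)]
    exact pvTail_eq (s.drop i)

-- ===== VERDICT (by name: the statement is the Claim_ definition above) =====
theorem get_basename_from_path_py_spec : Claim_equal_get_basename_from_path_py := by
  intro path _
  unfold Spec_get_basename_from_path_py get_basename_from_path_py get_basename_from_path_py_alt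
  have := pvCore_eq path.toList 0
  simp only [List.drop_zero] at this
  rw [this]
  cases hh : pvAux_bRfind (path.toList.drop (pvAux_bStripIdx path.toList 0)) <;>
    simp [hh, List.drop_drop, Nat.add_comm]
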